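-- pv_equiv track=rewrite | github.com/mbuhidar/retro_typein_tools | src/debug_tokenize/debug_tokenize.py | ahoy1_checksum
-- ===== SOURCE A (Python) =====
-- def ahoy1_checksum(byte_list):
--     '''
--     Function to create Ahoy checksums from passed in byte list to match the
--     codes printed in the magazine to check each line for typed in accuracy.
--     Covers Ahoy Bug Repellent version for Mar-Apr 1984 issues.
--     '''
--
--     next_value = 0
--
--     for char_val in byte_list:
--         # Detect spaces that are outside of quotes and ignore them, else
--         # execute primary checksum generation algorithm
--         if char_val == 32:
--             continue
--         else:
--             next_value = char_val + next_value
--             next_value = next_value << 1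
--
--     xor_value = next_value
--     # get high nibble of xor_value
--     high_nib = (xor_value & 0xf0) >> 4
--     high_char_val = high_nib + 65  # 0x41
--     # get low nibble of xor_value
--     low_nib = xor_value & 0x0f
--     low_char_val = low_nib + 65  # 0x41
--     checksum = chr(high_char_val) + chr(low_char_val)
--     return checksum
-- ===== SOURCE B (Python) =====
-- def ahoy1_checksum(byte_list):
--     # Pass 1: keep only the non-space bytes.
--     data = [b for b in byte_list if b != 32]
--     # Pass 2: position-weighted sum (closed form of the running (acc+b)<<1 fold).
--     n = len(data)
--     total = sum(b << (n - i) for i, b in enumerate(data))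
--     high_nib = (total & 0xf0) >> 4
--     low_nib = total & 0x0f
--     return chr(high_nib + 65) + chr(low_nib + 65)
-- ===== Notes on version B (the rewrite author's own statement) =====
-- stated objective: alternative
-- what changed: Replaces the running (acc+b)<<1 fold over all bytes by a two-pass formulation: first filter out spaces, then compute the checksum as a position-weighted sum b_i << (n-i) over the filtered list, before the same nibble-to-letter mapping.
import Mathlib
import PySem

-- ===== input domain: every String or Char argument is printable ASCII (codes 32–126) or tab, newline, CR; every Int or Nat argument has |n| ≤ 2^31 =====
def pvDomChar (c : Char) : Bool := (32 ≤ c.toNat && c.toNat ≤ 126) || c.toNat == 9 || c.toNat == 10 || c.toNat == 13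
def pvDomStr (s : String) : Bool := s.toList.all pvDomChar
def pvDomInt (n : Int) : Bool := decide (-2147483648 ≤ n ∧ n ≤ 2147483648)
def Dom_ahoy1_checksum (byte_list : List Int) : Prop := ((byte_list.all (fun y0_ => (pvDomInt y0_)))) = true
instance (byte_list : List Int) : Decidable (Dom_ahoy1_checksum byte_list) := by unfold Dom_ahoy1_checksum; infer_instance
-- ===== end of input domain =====

-- B replaces the running (acc+b)<<1 fold by filter-then-position-weighted-sum; same cost, different decomposition.

-- ===== PORT A =====
def ahoy1_checksum (byte_list : List Int) : String :=
  let next_value : Int :=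
    byte_list.foldl
      (fun (next_value : Int) (char_val : Int) =>
        if char_val = 32 then next_value
        else (char_val + next_value) <<< (1 : Nat)) 0
  let xor_value := next_value
  let high_nib := (PySem.Int.band xor_value 0xf0) >>> (4 : Nat)
  let high_char_val := high_nib + 65
  let low_nib := PySem.Int.band xor_value 0x0f
  let low_char_val := low_nib + 65
  String.ofList [Char.ofNat high_char_val.toNat, Char.ofNat low_char_val.toNat]

-- ===== PORT B =====
def ahoy1_checksum_alt (byte_list : List Int) : String :=
  let data := byte_list.filter (fun b => b ≠ 32)
  let n := data.length
  let total : Int := (data.zipIdx.map (fun (p : Int × Nat) => p.1 <<< (n - p.2))).sum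
  let high_nib := (PySem.Int.band total 0xf0) >>> (4 : Nat)
  let low_nib := PySem.Int.band total 0x0f
  String.ofList [Char.ofNat (high_nib + 65).toNat, Char.ofNat (low_nib + 65).toNat]

-- ===== PRECONDITION & SPEC =====
def Spec_ahoy1_checksum (byte_list : List Int) (out : String) : Prop := out = ahoy1_checksum_alt byte_list
instance (byte_list : List Int) (out : String) : Decidable (Spec_ahoy1_checksum byte_list out) := by unfold Spec_ahoy1_checksum; infer_instance

-- ===== CLAIM (what is proved, stated in full; the proofs are below) =====
def Claim_equal_ahoy1_checksum : Prop := ∀ (byte_list : List Int), Dom_ahoy1_checksum byte_list → Spec_ahoy1_checksum byte_list (ahoy1_checksum byte_list)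

-- ===== LEMMAS AND PROOFS =====

-- A's fold skips spaces, so it equals the space-free fold over the filtered list.
theorem fold_filter (xs : List Int) (acc : Int) :
    xs.foldl (fun (a c : Int) => if c = 32 then a else (c + a) <<< (1 : Nat)) acc
      = (xs.filter (fun b => b ≠ 32)).foldl (fun (a c : Int) => (c + a) <<< (1 : Nat)) acc := by
  induction xs generalizing acc with
  | nil => rfl
  | cons x xs ih =>
    by_cases h : x = 32 <;> simp [h, ih]

-- The space-free fold is a position-weighted sum (offset k for the zipIdx induction).
theorem fold_weighted (fs : List Int) (acc : Int) (k : Nat) :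
    fs.foldl (fun (a c : Int) => (c + a) <<< (1 : Nat)) acc
      = acc * 2 ^ fs.length
        + ((fs.zipIdx k).map (fun (p : Int × Nat) => p.1 <<< (k + fs.length - p.2))).sum := by
  induction fs generalizing acc k with
  | nil => simp
  | cons b fs ih =>
    simp only [List.foldl_cons, List.zipIdx_cons, List.map_cons, List.sum_cons,
      List.length_cons, ih ((b + acc) <<< (1 : Nat)) (k + 1)]
    simp only [Int.shiftLeft_eq]
    have h1 : k + (fs.length + 1) - k = fs.length + 1 := by omega
    have h2 : ∀ p : Int × Nat, p ∈ fs.zipIdx (k + 1) →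
        p.1 * 2 ^ (k + 1 + fs.length - p.2) = p.1 * 2 ^ (k + (fs.length + 1) - p.2) := by
      intro p _; congr 2; omega
    rw [List.map_congr_left h2, h1]
    ring

-- ===== VERDICT (by name: the statement is the Claim_ definition above) =====
theorem ahoy1_checksum_spec : Claim_equal_ahoy1_checksum := by
  intro xs _
  show _ = _
  unfold ahoy1_checksum ahoy1_checksum_alt
  simp only [fold_filter, fold_weighted _ 0 0, zero_mul, zero_add]
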